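-- pv_equiv track=rewrite | github.com/aarnav-kembhavi/Cloud-Services-API-Security-main | backend/utils/csv_utils.py | process_logs
-- ===== SOURCE A (Python) =====
-- from typing import List, Dict, Any
--
-- def process_logs(logs: List[Dict[str, Any]]) -> List[Dict[str, str]]:
--     processed_logs = []
--     for log in logs:
--         processed_logs.append({
--             'headers_Host': log.get('headers_Host') or 'none',
--             'url': log.get('url') or 'none',
--             'method': log.get('method') or 'UNKNOWN',
--             'requestHeaders_Origin': log.get('requestHeaders_Origin') or 'none',
--             'requestHeaders_Content_Type': log.get('requestHeaders_Content_Type') or 'none',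
--             'responseHeaders_Content_Type': log.get('responseHeaders_Content_Type') or 'none',
--             'requestHeaders_Referer': log.get('requestHeaders_Referer') or 'none',
--             'requestHeaders_Accept': log.get('requestHeaders_Accept') or 'none',
--         })
--     return processed_logs
-- ===== SOURCE B (Python) =====
-- DEFAULTS = {
--     'headers_Host': 'none',
--     'url': 'none',
--     'method': 'UNKNOWN',
--     'requestHeaders_Origin': 'none',
--     'requestHeaders_Content_Type': 'none',
--     'responseHeaders_Content_Type': 'none',
--     'requestHeaders_Referer': 'none',
--     'requestHeaders_Accept': 'none',
-- }
--
-- def process_logs(logs):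
--     out = []
--     for log in logs:
--         record = dict(DEFAULTS)
--         for key, value in log.items():
--             if key in record and value:
--                 record[key] = value
--         out.append(record)
--     return out
-- ===== Notes on version B (the rewrite author's own statement) =====
-- stated objective: alternative
-- what changed: Instead of A's eight separate get-or-default lookups into each log, B copies a module-level DEFAULTS dict and merges the log into it in a single pass over the log's items, overwriting only fields the log supplies with truthy values.
import Mathlib
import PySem

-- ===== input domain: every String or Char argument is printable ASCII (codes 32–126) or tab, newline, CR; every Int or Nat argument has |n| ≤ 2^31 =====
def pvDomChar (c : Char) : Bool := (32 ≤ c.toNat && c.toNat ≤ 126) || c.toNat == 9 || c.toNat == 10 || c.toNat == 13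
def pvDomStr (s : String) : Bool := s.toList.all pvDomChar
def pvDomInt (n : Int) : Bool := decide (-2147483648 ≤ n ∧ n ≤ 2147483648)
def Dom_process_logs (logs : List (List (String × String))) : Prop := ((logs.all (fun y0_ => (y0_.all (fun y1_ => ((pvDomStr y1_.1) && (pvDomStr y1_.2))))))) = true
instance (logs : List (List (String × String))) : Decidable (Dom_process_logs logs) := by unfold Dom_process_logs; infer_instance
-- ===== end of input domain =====

-- B replaces A's eight per-field lookups into each log by a single merge pass: it copies a
-- defaults dict and scans the log's items once, overwriting fields the log supplies truthy
-- values for (objective: alternative traversal of the same data).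

-- ===== PORT A =====
-- log.get(k): first match in the association list (Python dict lookup), none if absent
def aGet (log : List (String × String)) (k : String) : Option String :=
  match log with
  | [] => none
  | (k', v) :: rest => if k' = k then some v else aGet rest k

-- `x or d`: d if x is None or falsy (the empty string), else x
def aOr (x : Option String) (d : String) : String :=
  match x with
  | none => d
  | some s => if s = "" then d else s

def process_logs (logs : List (List (String × String))) : List (List (String × String)) :=
  logs.foldl (fun processed_logs log =>
    processed_logs ++ [[
      ("headers_Host", aOr (aGet log "headers_Host") "none"),
      ("url", aOr (aGet log "url") "none"),
      ("method", aOr (aGet log "method") "UNKNOWN"),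
      ("requestHeaders_Origin", aOr (aGet log "requestHeaders_Origin") "none"),
      ("requestHeaders_Content_Type", aOr (aGet log "requestHeaders_Content_Type") "none"),
      ("responseHeaders_Content_Type", aOr (aGet log "responseHeaders_Content_Type") "none"),
      ("requestHeaders_Referer", aOr (aGet log "requestHeaders_Referer") "none"),
      ("requestHeaders_Accept", aOr (aGet log "requestHeaders_Accept") "none")]]) []

-- ===== PORT B =====
-- the module-level DEFAULTS dict of Source B
def bDefaults : PySem.Dict String String :=
  PySem.Dict.ofList
    [("headers_Host", "none"), ("url", "none"), ("method", "UNKNOWN"),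
     ("requestHeaders_Origin", "none"), ("requestHeaders_Content_Type", "none"),
     ("responseHeaders_Content_Type", "none"), ("requestHeaders_Referer", "none"),
     ("requestHeaders_Accept", "none")]

-- the inner merge loop of Source B: `if key in record and value: record[key] = value`
def bMergeStep (record : PySem.Dict String String) (p : String × String) : PySem.Dict String String :=
  if record.contains p.1 && p.2 != "" then record.insert p.1 p.2 else record

def process_logs_alt (logs : List (List (String × String))) : List (List (String × String)) :=
  logs.map (fun log => (log.foldl bMergeStep bDefaults).items)

-- ===== PRECONDITION & SPEC =====
-- Pre_ excludes association lists in which some log carries a duplicate key: such a list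
-- represents no Python dict (A's parameter type), so no Python input is excluded.
def Pre_process_logs (logs : List (List (String × String))) : Prop :=
  ∀ log ∈ logs, (log.map Prod.fst).Nodup
instance (logs : List (List (String × String))) : Decidable (Pre_process_logs logs) := by
  unfold Pre_process_logs; infer_instance

def pvWitness_process_logs : (List (List (String × String))) :=
  [[("url", "http://a.example/x"), ("method", "GET"), ("other", "1")], [("url", "")]]

def Spec_process_logs (logs : List (List (String × String))) (out : List (List (String × String))) : Prop := out = process_logs_alt logs
instance (logs : List (List (String × String))) (out : List (List (String × String))) : Decidable (Spec_process_logs logs out) := by unfold Spec_process_logs; infer_instance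

-- ===== CLAIM (what is proved, stated in full; the proofs are below) =====
def Claim_equal_process_logs : Prop := ∀ (logs : List (List (String × String))), Dom_process_logs logs → Pre_process_logs logs → Spec_process_logs logs (process_logs logs)

-- ===== LEMMAS AND PROOFS =====

theorem aGet_eq_none_of_not_mem (log : List (String × String)) (k : String)
    (h : k ∉ log.map Prod.fst) : aGet log k = none := by
  induction log with
  | nil => rfl
  | cons p rest ih =>
    obtain ⟨k', v⟩ := p
    simp only [List.map_cons, List.mem_cons, not_or] at h
    simp [aGet, Ne.symm h.1, ih h.2]

-- value a finished merge holds at an entry of r: the log's (unique) truthy match, else the old value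
def mergeVal (log : List (String × String)) (p : String × String) : String × String :=
  (p.1, aOr (aGet log p.1) p.2)

theorem items_foldl_merge (log : List (String × String)) (hnd : (log.map Prod.fst).Nodup)
    (r : PySem.Dict String String) :
    (log.foldl bMergeStep r).items = r.items.map (mergeVal log) := by
  induction log generalizing r with
  | nil =>
    rw [show mergeVal [] = id from funext (fun q => by simp [mergeVal, aGet, aOr]), List.map_id]
    rfl
  | cons p rest ih =>
    obtain ⟨k, v⟩ := p
    simp only [List.map_cons, List.nodup_cons] at hnd
    have hrest : aGet rest k = none := aGet_eq_none_of_not_mem rest k hnd.1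
    by_cases hv : v = ""
    · -- falsy value: the step leaves the record unchanged, and A's `or` falls back too
      rw [List.foldl_cons, show bMergeStep r (k, v) = r from by simp [bMergeStep, hv], ih hnd.2]
      apply List.map_congr_left
      intro q _
      by_cases hk : q.1 = k
      · simp [mergeVal, hk, aGet, hrest, hv, aOr]
      · simp [mergeVal, aGet, Ne.symm hk]
    · by_cases hc : r.contains k
      · -- present & truthy: overwrite in place
        rw [List.foldl_cons,
          show bMergeStep r (k, v) = r.insert k v from by simp [bMergeStep, hc, hv],
          ih hnd.2, PySem.Dict.items_insert_of_contains r v hc, List.map_map]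
        apply List.map_congr_left
        intro q _
        by_cases hk : q.1 = k
        · simp [Function.comp, mergeVal, hk, aGet, hrest, hv, aOr]
        · simp [Function.comp, mergeVal, aGet, hk, Ne.symm hk]
      · -- key not in the record: the step is a no-op, and no entry of r has key k
        rw [List.foldl_cons, show bMergeStep r (k, v) = r from by simp [bMergeStep, hc],
          ih hnd.2]
        apply List.map_congr_left
        intro q hq
        have hk : q.1 ≠ k := fun hkk => hc ((PySem.Dict.contains_iff_mem_keys r k).mpr
          (hkk ▸ PySem.Dict.mem_keys_of_mem_items r hq))
        simp [mergeVal, aGet, Ne.symm hk]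

theorem record_eq (log : List (String × String)) (hnd : (log.map Prod.fst).Nodup) :
    (log.foldl bMergeStep bDefaults).items =
      [("headers_Host", aOr (aGet log "headers_Host") "none"),
       ("url", aOr (aGet log "url") "none"),
       ("method", aOr (aGet log "method") "UNKNOWN"),
       ("requestHeaders_Origin", aOr (aGet log "requestHeaders_Origin") "none"),
       ("requestHeaders_Content_Type", aOr (aGet log "requestHeaders_Content_Type") "none"),
       ("responseHeaders_Content_Type", aOr (aGet log "responseHeaders_Content_Type") "none"),
       ("requestHeaders_Referer", aOr (aGet log "requestHeaders_Referer") "none"),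
       ("requestHeaders_Accept", aOr (aGet log "requestHeaders_Accept") "none")] := by
  rw [items_foldl_merge log hnd bDefaults]
  rfl

-- ===== VERDICT (by name: the statement is the Claim_ definition above) =====
theorem process_logs_spec : Claim_equal_process_logs := by
  intro logs _ hpre
  unfold Spec_process_logs process_logs process_logs_alt
  rw [PySem.List.foldl_append_singleton_eq_map]
  apply List.map_congr_left
  intro log hlog
  exact (record_eq log (hpre log hlog)).symm
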